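-- pv_equiv track=rewrite | github.com/IlyinVyacheslav/BioInformatics | test.py | get_consensus_letter
-- ===== SOURCE A (Python) =====
-- IUPAC_codes = {'A': ['A'],
--                'C': ['C'],
--                'G': ['G'],
--                'T': ['T'],
--                'R': ['A', 'G'],
--                'Y': ['C', 'T'],
--                'W': ['A', 'T'],
--                'S': ['C', 'G'],
--                'K': ['G', 'T'],
--                'M': ['A', 'C'],
--                'B': ['C', 'G', 'T'],
--                'D': ['A', 'G', 'T'],
--                'H': ['A', 'C', 'T'],
--                'V': ['A', 'C', 'G'],
--                'N': ['A', 'C', 'G', 'T']}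
--
-- def get_consensus_letter(sequences, index):
--     alphabet = dict([('A', 0), ('C', 0), ('G', 0), ('T', 0)])
--     for seq_index in range(len(sequences)):
--         letter = sequences[seq_index][index]
--         if letter == '-':
--             continue
--         elif IUPAC_codes.get(letter) is not None:
--             for let in IUPAC_codes.get(letter):
--                 alphabet[let] += 1
--     sorted_alphabet = sorted(alphabet.items(), key=lambda x: -x[1])
--     letters = [sorted_alphabet[0][0]]
--     for i in range(1, len(sorted_alphabet)):
--         if sorted_alphabet[i][1] == sorted_alphabet[i - 1][1]:
--             letters.append(sorted_alphabet[i][0])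
--         else:
--             break
--     return list(IUPAC_codes.keys())[list(IUPAC_codes.values()).index(letters)]
-- ===== SOURCE B (Python) =====
-- # Transposed IUPAC table: for each base, the codes that contain it; plus a
-- # 16-entry string mapping the bitmask of max-count bases to the IUPAC letter.
-- _HAS_A = 'ARWMDHVN'
-- _HAS_C = 'CYSMBHVN'
-- _HAS_G = 'GRSKBDVN'
-- _HAS_T = 'TYWKBDHN'
-- _LETTER = '?ACMGRSVTWYHKDBN'  # index = A + 2*C + 4*G + 8*T; 0 unreachable
--
-- def get_consensus_letter(sequences, index):
--     a = c = g = t = 0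
--     for seq in sequences:
--         ch = seq[index]
--         if ch in _HAS_A: a += 1
--         if ch in _HAS_C: c += 1
--         if ch in _HAS_G: g += 1
--         if ch in _HAS_T: t += 1
--     mx = max(a, c, g, t)
--     return _LETTER[(a == mx) + 2*(c == mx) + 4*(g == mx) + 8*(t == mx)]
-- ===== Notes on version B (the rewrite author's own statement) =====
-- stated objective: simpler
-- what changed: Replaces the counter dict + expansion loop + sort + tie-walk + reverse index lookup by four plain counters driven by a transposed IUPAC membership table and a direct 16-entry bitmask-to-letter string lookup.
import Mathlib
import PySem

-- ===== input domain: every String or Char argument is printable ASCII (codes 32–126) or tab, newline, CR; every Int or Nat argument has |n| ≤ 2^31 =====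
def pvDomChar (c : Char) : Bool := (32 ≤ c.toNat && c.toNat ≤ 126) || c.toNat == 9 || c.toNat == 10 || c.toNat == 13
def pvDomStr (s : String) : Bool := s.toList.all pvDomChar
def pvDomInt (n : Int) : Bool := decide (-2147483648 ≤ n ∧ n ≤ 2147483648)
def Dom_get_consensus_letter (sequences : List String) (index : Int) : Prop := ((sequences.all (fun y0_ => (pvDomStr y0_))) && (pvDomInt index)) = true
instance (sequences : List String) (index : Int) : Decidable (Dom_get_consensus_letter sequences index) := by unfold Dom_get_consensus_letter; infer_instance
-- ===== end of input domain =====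

-- B replaces A's counter dict + IUPAC expansion loop + sort + tie-walk + reverse
-- dict lookup by four counters fed from a transposed IUPAC membership table and a
-- direct bitmask-to-letter string lookup (objective: simpler).

-- ===== PORT A =====
-- the module constant IUPAC_codes (its keys are the single characters Python indexes with)
def pvIUPAC : PySem.Dict Char (List Char) :=
  PySem.Dict.ofList [('A', ['A']), ('C', ['C']), ('G', ['G']), ('T', ['T']),
    ('R', ['A','G']), ('Y', ['C','T']), ('W', ['A','T']), ('S', ['C','G']),
    ('K', ['G','T']), ('M', ['A','C']), ('B', ['C','G','T']), ('D', ['A','G','T']),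
    ('H', ['A','C','T']), ('V', ['A','C','G']), ('N', ['A','C','G','T'])]

-- the 'for i in range(1, len(sorted_alphabet)): … else break' tie loop,
-- carrying prev = sorted_alphabet[i-1][1]
def pvTieWalk : List (Char × Int) → Int → List Char → List Char
  | [], _, acc => acc
  | (k, v) :: rest, prev, acc => if v = prev then pvTieWalk rest v (acc ++ [k]) else acc

def get_consensus_letter (sequences : List String) (index : Int) : String :=
  let alphabet : PySem.Dict Char Int := PySem.Dict.ofList [('A',0),('C',0),('G',0),('T',0)]
  let alphabet := (PySem.List.pyRange 0 (sequences.length : Int) 1).foldl (fun d j =>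
    -- letter = sequences[seq_index][index]; an IndexError (pyGet? = none) is excluded by Pre_
    let letter := (PySem.Str.pyGet? (PySem.List.pyGetD sequences j "") index).getD '-'
    if letter = '-' then d
    -- 'elif IUPAC_codes.get(letter) is not None: for let in IUPAC_codes.get(letter): …'
    -- (Python calls .get twice: an isSome test, then the value)
    else if (pvIUPAC.get? letter).isSome then
      ((pvIUPAC.get? letter).getD []).foldl (fun d l => d.modify l 0 (· + 1)) d
    else d) alphabet
  let sorted_alphabet := PySem.List.sorted alphabet.items (fun x => -x.2) false
  let head := PySem.List.pyGetD sorted_alphabet 0 ('?', 0)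
  let letters := pvTieWalk sorted_alphabet.tail head.2 [head.1]
  -- list(IUPAC_codes.keys())[list(IUPAC_codes.values()).index(letters)]
  -- (the ValueError branch of .index is unreachable: letters is always a value of IUPAC_codes)
  let i := (PySem.List.index? pvIUPAC.values letters).getD 0
  String.ofList [PySem.List.pyGetD pvIUPAC.keys (i : Int) '?']

-- ===== PORT B =====
def get_consensus_letter_alt (sequences : List String) (index : Int) : String :=
  let st := sequences.foldl (fun (st : Int × Int × Int × Int) seq =>
    let ch := (PySem.Str.pyGet? seq index).getD '-'   -- IndexError excluded by Pre_
    let a := if "ARWMDHVN".toList.contains ch then st.1 + 1 else st.1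
    let c := if "CYSMBHVN".toList.contains ch then st.2.1 + 1 else st.2.1
    let g := if "GRSKBDVN".toList.contains ch then st.2.2.1 + 1 else st.2.2.1
    let t := if "TYWKBDHN".toList.contains ch then st.2.2.2 + 1 else st.2.2.2
    (a, c, g, t)) (0, 0, 0, 0)
  let mx := max st.1 (max st.2.1 (max st.2.2.1 st.2.2.2))   -- max(a, c, g, t)
  let mask : Int := (if st.1 = mx then 1 else 0) + 2 * (if st.2.1 = mx then 1 else 0)
    + 4 * (if st.2.2.1 = mx then 1 else 0) + 8 * (if st.2.2.2 = mx then 1 else 0)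
  String.ofList [(PySem.Str.pyGet? "?ACMGRSVTWYHKDBN" mask).getD '?']

-- ===== PRECONDITION & SPEC =====
-- Pre_ excludes exactly the inputs where Python A raises IndexError:
-- some sequence does not admit the (possibly negative) column index.
def Pre_get_consensus_letter (sequences : List String) (index : Int) : Prop :=
  ∀ s ∈ sequences, PySem.Raise.InRange s.toList.length index
instance (sequences : List String) (index : Int) : Decidable (Pre_get_consensus_letter sequences index) := by unfold Pre_get_consensus_letter; infer_instance

def pvWitness_get_consensus_letter : List String × Int := (["AC", "GT", "R-"], 1)

def Spec_get_consensus_letter (sequences : List String) (index : Int) (out : String) : Prop := out = get_consensus_letter_alt sequences index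
instance (sequences : List String) (index : Int) (out : String) : Decidable (Spec_get_consensus_letter sequences index out) := by unfold Spec_get_consensus_letter; infer_instance

-- ===== CLAIM (what is proved, stated in full; the proofs are below) =====
def Claim_equal_get_consensus_letter : Prop := ∀ (sequences : List String) (index : Int), Dom_get_consensus_letter sequences index → Pre_get_consensus_letter sequences index → Spec_get_consensus_letter sequences index (get_consensus_letter sequences index)

-- ===== LEMMAS AND PROOFS =====

theorem pv_ib_nil {α : Type} (f : α → α → Bool) (x : α) :
    PySem.List.insertBy f x [] = [x] := by rw [PySem.List.insertBy.eq_def]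

theorem pv_ib_cons {α : Type} (f : α → α → Bool) (x y : α) (ys : List α) :
    PySem.List.insertBy f x (y :: ys)
      = if f x y then x :: y :: ys else y :: PySem.List.insertBy f x ys := by
  rw [PySem.List.insertBy.eq_def]

theorem pv_items (a c g t : Int) :
    (PySem.Dict.ofList [('A',a),('C',c),('G',g),('T',t)]).items
      = [('A',a),('C',c),('G',g),('T',t)] := rfl

-- A's counting step on the four-key dict mirrors B's counting step on the tuple
set_option maxHeartbeats 3000000 in
theorem pv_step_eq (ch : Char) (a c g t : Int) :
    (if ch = '-' then PySem.Dict.ofList [('A',a),('C',c),('G',g),('T',t)]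
     else if (pvIUPAC.get? ch).isSome then
       ((pvIUPAC.get? ch).getD []).foldl (fun d l => d.modify l 0 (· + 1))
         (PySem.Dict.ofList [('A',a),('C',c),('G',g),('T',t)])
     else PySem.Dict.ofList [('A',a),('C',c),('G',g),('T',t)])
    = PySem.Dict.ofList
        [('A', if "ARWMDHVN".toList.contains ch then a + 1 else a),
         ('C', if "CYSMBHVN".toList.contains ch then c + 1 else c),
         ('G', if "GRSKBDVN".toList.contains ch then g + 1 else g),
         ('T', if "TYWKBDHN".toList.contains ch then t + 1 else t)] := by
  rcases eq_or_ne ch '-' with h|hdash; · subst h; rfl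
  rcases eq_or_ne ch 'A' with h|h1; · subst h; rfl
  rcases eq_or_ne ch 'C' with h|h2; · subst h; rfl
  rcases eq_or_ne ch 'G' with h|h3; · subst h; rfl
  rcases eq_or_ne ch 'T' with h|h4; · subst h; rfl
  rcases eq_or_ne ch 'R' with h|h5; · subst h; rfl
  rcases eq_or_ne ch 'Y' with h|h6; · subst h; rfl
  rcases eq_or_ne ch 'W' with h|h7; · subst h; rfl
  rcases eq_or_ne ch 'S' with h|h8; · subst h; rfl
  rcases eq_or_ne ch 'K' with h|h9; · subst h; rfl
  rcases eq_or_ne ch 'M' with h|h10; · subst h; rfl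
  rcases eq_or_ne ch 'B' with h|h11; · subst h; rfl
  rcases eq_or_ne ch 'D' with h|h12; · subst h; rfl
  rcases eq_or_ne ch 'H' with h|h13; · subst h; rfl
  rcases eq_or_ne ch 'V' with h|h14; · subst h; rfl
  rcases eq_or_ne ch 'N' with h|h15; · subst h; rfl
  have hmk : pvIUPAC = PySem.Dict.mk [('A', ['A']), ('C', ['C']), ('G', ['G']), ('T', ['T']),
      ('R', ['A','G']), ('Y', ['C','T']), ('W', ['A','T']), ('S', ['C','G']),
      ('K', ['G','T']), ('M', ['A','C']), ('B', ['C','G','T']), ('D', ['A','G','T']),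
      ('H', ['A','C','T']), ('V', ['A','C','G']), ('N', ['A','C','G','T'])] := rfl
  have hget : pvIUPAC.get? ch = none := by
    rw [hmk]
    simp [PySem.Dict.get?_mk_cons, Ne.symm h1, Ne.symm h2, Ne.symm h3, Ne.symm h4,
      Ne.symm h5, Ne.symm h6, Ne.symm h7, Ne.symm h8, Ne.symm h9, Ne.symm h10,
      Ne.symm h11, Ne.symm h12, Ne.symm h13, Ne.symm h14, Ne.symm h15]
    rfl
  rw [if_neg hdash, hget]
  simp_all

-- the two counting loops agree, for any starting counts
theorem pv_fold_eq (index : Int) (ss : List String) (a c g t : Int) :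
    ss.foldl (fun d seq =>
        if (PySem.Str.pyGet? seq index).getD '-' = '-' then d
        else if (pvIUPAC.get? ((PySem.Str.pyGet? seq index).getD '-')).isSome then
          ((pvIUPAC.get? ((PySem.Str.pyGet? seq index).getD '-')).getD []).foldl
            (fun d l => d.modify l 0 (· + 1)) d
        else d)
      (PySem.Dict.ofList [('A',a),('C',c),('G',g),('T',t)])
    = (fun st : Int × Int × Int × Int =>
        PySem.Dict.ofList [('A', st.1),('C', st.2.1),('G', st.2.2.1),('T', st.2.2.2)])
      (ss.foldl (fun (st : Int × Int × Int × Int) seq =>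
        (if "ARWMDHVN".toList.contains ((PySem.Str.pyGet? seq index).getD '-') then st.1 + 1 else st.1,
         if "CYSMBHVN".toList.contains ((PySem.Str.pyGet? seq index).getD '-') then st.2.1 + 1 else st.2.1,
         if "GRSKBDVN".toList.contains ((PySem.Str.pyGet? seq index).getD '-') then st.2.2.1 + 1 else st.2.2.1,
         if "TYWKBDHN".toList.contains ((PySem.Str.pyGet? seq index).getD '-') then st.2.2.2 + 1 else st.2.2.2))
        (a, c, g, t)) := by
  induction ss generalizing a c g t with
  | nil => rfl
  | cons s rest ih =>
      simp only [List.foldl_cons]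
      rw [pv_step_eq ((PySem.Str.pyGet? s index).getD '-') a c g t]
      exact ih _ _ _ _

-- A's sort + tie-walk + reverse lookup equals B's max + bitmask table, for any counts
set_option maxHeartbeats 4000000 in
set_option maxRecDepth 10000 in
theorem pv_select_eq (a c g t : Int) :
    (let sorted_alphabet := PySem.List.sorted
        [('A',a),('C',c),('G',g),('T',t)] (fun x => -x.2) false
     let head := PySem.List.pyGetD sorted_alphabet 0 ('?', 0)
     let letters := pvTieWalk sorted_alphabet.tail head.2 [head.1]
     let i := (PySem.List.index? pvIUPAC.values letters).getD 0
     String.ofList [PySem.List.pyGetD pvIUPAC.keys (i : Int) '?'])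
    = (let mx := max a (max c (max g t))
       let mask : Int := (if a = mx then 1 else 0) + 2 * (if c = mx then 1 else 0)
         + 4 * (if g = mx then 1 else 0) + 8 * (if t = mx then 1 else 0)
       String.ofList [(PySem.Str.pyGet? "?ACMGRSVTWYHKDBN" mask).getD '?']) := by
  rw [PySem.List.sorted_eq_foldl_insertBy]
  simp only [List.foldl, pv_ib_nil, pv_ib_cons, decide_eq_true_eq]
  split_ifs <;> simp only [pv_ib_nil, pv_ib_cons, decide_eq_true_eq] <;>
    split_ifs <;> simp only [pv_ib_nil, pv_ib_cons, decide_eq_true_eq] <;>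
    split_ifs <;> simp only [List.tail, pvTieWalk, PySem.List.pyGetD_zero_cons,
      List.cons_append, List.nil_append] <;>
    split_ifs <;> first | omega | decide

-- ===== VERDICT (by name: the statement is the Claim_ definition above) =====
theorem get_consensus_letter_spec : Claim_equal_get_consensus_letter := by
  intro sequences index _ _
  unfold Spec_get_consensus_letter
  show get_consensus_letter sequences index = get_consensus_letter_alt sequences index
  simp only [get_consensus_letter, get_consensus_letter_alt]
  rw [PySem.List.foldl_pyRange_zero_pyGetD' sequences ""
      (fun d seq =>
        if (PySem.Str.pyGet? seq index).getD '-' = '-' then d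
        else if (pvIUPAC.get? ((PySem.Str.pyGet? seq index).getD '-')).isSome then
          ((pvIUPAC.get? ((PySem.Str.pyGet? seq index).getD '-')).getD []).foldl
            (fun (d : PySem.Dict Char Int) (l : Char) => d.modify l 0 (· + 1)) d
        else d)
      (PySem.Dict.ofList [('A',0),('C',0),('G',0),('T',0)])]
  rw [pv_fold_eq index sequences 0 0 0 0]
  rw [pv_items]
  exact pv_select_eq _ _ _ _
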